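-- pv_equiv track=rewrite | github.com/Broather/auto-math | test.py | the_thing
-- ===== SOURCE A (Python) =====
-- def the_thing(list_of_lists, set):
--     # returns a dictionary with key: string format for number: what is the lowest occurences of that item
--     my_dict = {}
--     for set_item in set:
--         counts = []
--         for lst in list_of_lists:
--             counts.append(lst.count(set_item))
--         my_dict[str(set_item)] = min(counts)
--     return my_dict
-- ===== SOURCE B (Python) =====
-- def the_thing(list_of_lists, set):
--     # Fold all lists into ONE running-minimum count table (Counter intersection),
--     # then read each set item straight off the merged table: no per-item pass
--     # over the lists and no per-item min over a counts list.
--     if not set: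
--         return {}
--     merged = None
--     for lst in list_of_lists:
--         counts = {}
--         for x in lst:
--             counts[x] = counts.get(x, 0) + 1
--         if merged is None:
--             merged = counts
--         else:
--             merged = {k: min(v, counts.get(k, 0)) for k, v in merged.items()}
--     return {str(item): merged.get(item, 0) for item in set}
-- ===== Notes on version B (the rewrite author's own statement) =====
-- stated objective: faster
-- what changed: B makes one pass over the lists, folding them into a single merged counter by pointwise-minimum intersection, and then answers every set item with one lookup in that merged table, instead of A's per-item rescan of every list with .count followed by min of a counts list.
import Mathlib
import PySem

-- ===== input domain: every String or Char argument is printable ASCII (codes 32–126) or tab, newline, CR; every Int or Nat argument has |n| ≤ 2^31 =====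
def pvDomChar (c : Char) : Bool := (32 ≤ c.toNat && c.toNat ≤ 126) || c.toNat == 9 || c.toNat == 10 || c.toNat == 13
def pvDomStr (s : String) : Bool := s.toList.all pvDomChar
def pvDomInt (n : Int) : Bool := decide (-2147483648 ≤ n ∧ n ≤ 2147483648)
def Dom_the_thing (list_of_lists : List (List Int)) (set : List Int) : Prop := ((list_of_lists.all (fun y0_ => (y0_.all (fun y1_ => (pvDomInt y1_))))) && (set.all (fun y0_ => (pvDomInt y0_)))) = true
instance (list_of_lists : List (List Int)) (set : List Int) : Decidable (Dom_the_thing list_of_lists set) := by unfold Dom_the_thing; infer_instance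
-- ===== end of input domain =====

-- B folds the lists into one pointwise-minimum merged counter (Counter intersection) read once per set item,
-- instead of A's per-item rescan of every list with .count and a min over the counts list.

-- ===== PORT A =====
-- literal port of A: for each set_item build the list of lst.count(set_item), insert min(counts)
def the_thing (list_of_lists : List (List Int)) (set : List Int) : List (String × Int) :=
  (set.foldl (fun (my_dict : PySem.Dict String Int) set_item =>
      let counts : List Int :=
        list_of_lists.foldl (fun acc lst => acc ++ [(PySem.List.count lst set_item : Int)]) []
      my_dict.insert (PySem.Int.toStr set_item)
        ((PySem.List.min? counts (fun x => x)).getD 0)   -- min([]) raises ValueError in Python: excluded by Pre_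
    ) PySem.Dict.empty).items

-- ===== PORT B =====
-- literal port of Source B: fold all lists into one merged running-minimum counter, then one lookup per set item
def the_thing_alt (list_of_lists : List (List Int)) (set : List Int) : List (String × Int) :=
  if set = [] then []
  else
    let merged : Option (PySem.Dict Int Int) :=
      list_of_lists.foldl
        (fun merged lst =>
          let counts : PySem.Dict Int Int :=
            lst.foldl (fun (t : PySem.Dict Int Int) x => t.insert x (t.getD x 0 + 1)) PySem.Dict.empty
          match merged with
          | none => some counts
          | some m =>
              some (m.items.foldl
                (fun (d : PySem.Dict Int Int) kv => d.insert kv.1 (min kv.2 (counts.getD kv.1 0)))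
                PySem.Dict.empty))
        none
    match merged with
    | none => []   -- Python B raises AttributeError here (merged is None): excluded by Pre_
    | some m =>
        (set.foldl (fun (d : PySem.Dict String Int) item =>
            d.insert (PySem.Int.toStr item) (m.getD item 0)) PySem.Dict.empty).items

-- ===== PRECONDITION & SPEC =====
-- Pre_ excludes exactly the inputs where Python A raises ValueError (min of an empty
-- counts list: empty list_of_lists with a nonempty set); Python B raises there too.
def Pre_the_thing (list_of_lists : List (List Int)) (set : List Int) : Prop :=
  list_of_lists ≠ [] ∨ set = []
instance (list_of_lists : List (List Int)) (set : List Int) : Decidable (Pre_the_thing list_of_lists set) := by unfold Pre_the_thing; infer_instance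

def pvWitness_the_thing : List (List Int) × List Int := ([[1, 2, 2], [2, 1]], [2, 1, 3])

def Spec_the_thing (list_of_lists : List (List Int)) (set : List Int) (out : List (String × Int)) : Prop := out = the_thing_alt list_of_lists set
instance (list_of_lists : List (List Int)) (set : List Int) (out : List (String × Int)) : Decidable (Spec_the_thing list_of_lists set out) := by unfold Spec_the_thing; infer_instance

-- ===== CLAIM (what is proved, stated in full; the proofs are below) =====
def Claim_equal_the_thing : Prop := ∀ (list_of_lists : List (List Int)) (set : List Int), Dom_the_thing list_of_lists set → Pre_the_thing list_of_lists set → Spec_the_thing list_of_lists set (the_thing list_of_lists set)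

-- ===== LEMMAS AND PROOFS =====

-- abbreviation for B's intersection step (proof-side only; the port spells it out)
def pvInter (m c : PySem.Dict Int Int) : PySem.Dict Int Int :=
  m.items.foldl (fun (d : PySem.Dict Int Int) kv => d.insert kv.1 (min kv.2 (c.getD kv.1 0))) PySem.Dict.empty

theorem pvInter_items (m c : PySem.Dict Int Int) (hm : m.keys.Nodup) :
    (pvInter m c).items = m.items.map (fun kv => (kv.1, min kv.2 (c.getD kv.1 0))) := by
  unfold pvInter
  have h := PySem.Dict.items_foldl_insert_fresh m.items (fun kv => kv.1)
    (fun kv => min kv.2 (c.getD kv.1 0)) PySem.Dict.empty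
    (by intro a _; simp [PySem.Dict.contains_empty]) (by simpa [PySem.Dict.keys] using hm)
  simpa using h

theorem pvInter_keys (m c : PySem.Dict Int Int) (hm : m.keys.Nodup) :
    (pvInter m c).keys = m.keys := by
  simp [PySem.Dict.keys, pvInter_items m c hm]

theorem pvInter_getD (m c : PySem.Dict Int Int) (hm : m.keys.Nodup)
    (hc : ∀ k, 0 ≤ c.getD k 0) (item : Int) :
    (pvInter m c).getD item 0 = min (m.getD item 0) (c.getD item 0) := by
  by_cases hmem : item ∈ m.keys
  · obtain ⟨v, hv⟩ : ∃ v, (item, v) ∈ m.items := by simpa [PySem.Dict.keys] using hmem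
    have hmv : m.getD item 0 = v := PySem.Dict.getD_of_mem_items m hv hm 0
    have hmemI : (item, min v (c.getD item 0)) ∈ (pvInter m c).items := by
      rw [pvInter_items m c hm]
      exact List.mem_map.mpr ⟨(item, v), hv, rfl⟩
    have hnd' : (pvInter m c).keys.Nodup := by rw [pvInter_keys m c hm]; exact hm
    rw [PySem.Dict.getD_of_mem_items _ hmemI hnd' 0, hmv]
  · have h1 : m.getD item 0 = 0 := by
      apply PySem.Dict.getD_of_not_contains
      rw [PySem.Dict.contains_eq_decide_mem_keys]; simpa using hmem
    have h2 : (pvInter m c).getD item 0 = 0 := by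
      apply PySem.Dict.getD_of_not_contains
      rw [PySem.Dict.contains_eq_decide_mem_keys, pvInter_keys m c hm]; simpa using hmem
    rw [h1, h2, min_eq_left (hc item)]

-- the merged fold over the remaining lists, characterised pointwise
theorem merged_fold_getD (ls : List (List Int)) (m : PySem.Dict Int Int) (hm : m.keys.Nodup) :
    ls.foldl
      (fun merged lst =>
        let counts : PySem.Dict Int Int :=
          lst.foldl (fun (t : PySem.Dict Int Int) x => t.insert x (t.getD x 0 + 1)) PySem.Dict.empty
        match merged with
        | none => some counts
        | some m =>
            some (m.items.foldl
              (fun (d : PySem.Dict Int Int) kv => d.insert kv.1 (min kv.2 (counts.getD kv.1 0)))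
              PySem.Dict.empty))
      (some m)
    = some (ls.foldl (fun m lst =>
        pvInter m (lst.foldl (fun (t : PySem.Dict Int Int) x => t.insert x (t.getD x 0 + 1)) PySem.Dict.empty)) m)
    ∧ (ls.foldl (fun m lst =>
        pvInter m (lst.foldl (fun (t : PySem.Dict Int Int) x => t.insert x (t.getD x 0 + 1)) PySem.Dict.empty)) m).keys.Nodup
    ∧ ∀ item, (ls.foldl (fun m lst =>
        pvInter m (lst.foldl (fun (t : PySem.Dict Int Int) x => t.insert x (t.getD x 0 + 1)) PySem.Dict.empty)) m).getD item 0
        = ls.foldl (fun a lst => min a ((PySem.List.count lst item : Int))) (m.getD item 0) := by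
  induction ls generalizing m with
  | nil => exact ⟨rfl, hm, fun _ => rfl⟩
  | cons l ls ih =>
    have hcounter : (l.foldl (fun (t : PySem.Dict Int Int) x => t.insert x (t.getD x 0 + 1)) PySem.Dict.empty)
        = PySem.Dict.counter l := PySem.Dict.foldl_insert_getD_add_one_eq_counter l
    have hc : ∀ k, 0 ≤ (l.foldl (fun (t : PySem.Dict Int Int) x => t.insert x (t.getD x 0 + 1)) PySem.Dict.empty).getD k 0 := by
      intro k; rw [hcounter, PySem.Dict.getD_counter]; positivity
    have hm' : (pvInter m (l.foldl (fun (t : PySem.Dict Int Int) x => t.insert x (t.getD x 0 + 1)) PySem.Dict.empty)).keys.Nodup := by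
      rw [pvInter_keys _ _ hm]; exact hm
    obtain ⟨h1, h2, h3⟩ := ih _ hm'
    refine ⟨by simpa using h1, by simpa using h2, ?_⟩
    intro item
    simp only [List.foldl_cons]
    rw [h3 item, pvInter_getD _ _ hm hc item, hcounter, PySem.Dict.getD_counter,
        PySem.List.count_eq]

-- ===== VERDICT (by name: the statement is the Claim_ definition above) =====
theorem the_thing_spec : Claim_equal_the_thing := by
  intro list_of_lists set _ hpre
  unfold Spec_the_thing the_thing the_thing_alt
  by_cases hs : set = []
  · subst hs; rfl
  · rw [if_neg hs]
    obtain ⟨l, ls, rfl⟩ : ∃ l ls, list_of_lists = l :: ls := by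
      rcases hpre with h | h
      · cases list_of_lists with
        | nil => exact absurd rfl h
        | cons l ls => exact ⟨l, ls, rfl⟩
      · exact absurd h hs
    have hcounter : (l.foldl (fun (t : PySem.Dict Int Int) x => t.insert x (t.getD x 0 + 1)) PySem.Dict.empty)
        = PySem.Dict.counter l := PySem.Dict.foldl_insert_getD_add_one_eq_counter l
    have hnd : (l.foldl (fun (t : PySem.Dict Int Int) x => t.insert x (t.getD x 0 + 1)) PySem.Dict.empty).keys.Nodup := by
      rw [hcounter]; exact PySem.Dict.nodup_keys_counter l
    obtain ⟨h1, _, h3⟩ := merged_fold_getD ls _ hnd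
    simp only [List.foldl_cons]
    rw [h1]
    congr 1
    apply PySem.List.foldl_congr_mem
    intro acc item _
    congr 1
    rw [h3 item, hcounter, PySem.Dict.getD_counter]
    rw [PySem.List.foldl_append_singleton_eq_map, List.nil_append, List.singleton_append,
        PySem.List.min?_id_cons, Option.getD_some, List.foldl_map]
    simp [PySem.List.count_eq]
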